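-- pv_equiv track=rewrite | github.com/zhuifeng001/chatdoc_stack | code/chatdoc/pkg/utils/generator.py | batch_generator_with_index
-- ===== SOURCE A (Python) =====
-- def batch_generator_with_index(iterator, batch_size):
--     batch = []
--     iterator = iter(iterator)
--
--     idx = 0
--     try:
--         while True:
--             for _ in range(batch_size):
--                 batch.append(next(iterator))
--             yield (idx, batch)
--             idx += 1
--             batch = []
--     except StopIteration:
--         if batch:  # 如果最后一个批次不足 batch_size 也返回
--             yield (idx, batch)
-- ===== SOURCE B (Python) =====
-- def batch_generator_with_index(iterator, batch_size):
--     # Materialize the input once, then walk it by index arithmetic, slicing out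
--     # each batch, instead of A's element-by-element pulling with try/except
--     # StopIteration.  Yielded values are identical for batch_size >= 1.
--     data = list(iterator)
--     n = len(data)
--     idx = 0
--     start = 0
--     while start < n:
--         yield (idx, data[start:start + batch_size])
--         idx += 1
--         start += batch_size
-- ===== Notes on version B (the rewrite author's own statement) =====
-- stated objective: alternative
-- what changed: B materializes the input into a list once and walks it by index arithmetic, slicing out data[start:start+batch_size] per step, instead of A's element-by-element filling of an accumulator guarded by try/except StopIteration; Pre_ excludes batch_size <= 0, where A is an infinite generator of empty batches and never terminates.
import Mathlib
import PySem

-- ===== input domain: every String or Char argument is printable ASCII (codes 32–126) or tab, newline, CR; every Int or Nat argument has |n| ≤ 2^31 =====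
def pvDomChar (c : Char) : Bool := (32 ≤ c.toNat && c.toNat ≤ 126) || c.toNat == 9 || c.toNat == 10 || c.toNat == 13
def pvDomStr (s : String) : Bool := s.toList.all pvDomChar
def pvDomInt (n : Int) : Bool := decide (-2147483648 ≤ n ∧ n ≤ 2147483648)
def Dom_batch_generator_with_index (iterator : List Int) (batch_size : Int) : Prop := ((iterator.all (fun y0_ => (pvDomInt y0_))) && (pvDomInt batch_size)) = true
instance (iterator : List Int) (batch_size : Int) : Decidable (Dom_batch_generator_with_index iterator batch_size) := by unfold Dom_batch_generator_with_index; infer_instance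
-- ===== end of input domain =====

-- B materializes the input and slices batches out by index arithmetic instead of
-- A's element-by-element pull with try/except StopIteration; objective: alternative.
-- (Both sides are generators in Python; equivalence is about the yielded values.)

-- ===== PORT A =====
-- inner 'for _ in range(batch_size): batch.append(next(iterator))':
-- returns (batch, remaining iterator, whether next() raised StopIteration)
def pvFillA : List Int → Nat → List Int → (List Int × List Int × Bool)
  | it, 0, batch => (batch, it, false)
  | [], _ + 1, batch => (batch, [], true)
  | x :: xs, k + 1, batch => pvFillA xs k (batch ++ [x])

-- the 'while True' loop; fuel = iterator.length + 1 suffices whenever the Python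
-- terminates (batch_size ≥ 1, per Pre_ below)
def pvLoopA (fuel : Nat) (it : List Int) (bs : Nat) (idx : Int) : List (Int × List Int) :=
  match fuel with
  | 0 => []
  | fuel + 1 =>
    match pvFillA it bs [] with
    | (batch, rest, stopped) =>
      if stopped then (if batch ≠ [] then [(idx, batch)] else [])
      else (idx, batch) :: pvLoopA fuel rest bs (idx + 1)

def batch_generator_with_index (iterator : List Int) (batch_size : Int) : List (Int × List Int) :=
  pvLoopA (iterator.length + 1) iterator batch_size.toNat 0

-- ===== PORT B =====
-- 'while start < n: yield (idx, data[start:start+batch_size]); idx += 1; start += batch_size'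
-- fuel = data.length + 1 suffices for batch_size ≥ 1 (start grows by ≥ 1 each pass)
def pvLoopB (fuel : Nat) (data : List Int) (bs : Nat) (start : Nat) (idx : Int) : List (Int × List Int) :=
  match fuel with
  | 0 => []
  | fuel + 1 =>
    if start < data.length then
      (idx, PySem.List.slice data (some (start : Int)) (some ((start : Int) + (bs : Int))))
        :: pvLoopB fuel data bs (start + bs) (idx + 1)
    else []

def batch_generator_with_index_alt (iterator : List Int) (batch_size : Int) : List (Int × List Int) :=
  pvLoopB (iterator.length + 1) iterator batch_size.toNat 0 0

-- ===== PRECONDITION & SPEC =====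
-- Pre_ excludes batch_size ≤ 0: there the Python A is an infinite generator of
-- empty batches (it never terminates consumed as a list), so no value is claimed.
def Pre_batch_generator_with_index (iterator : List Int) (batch_size : Int) : Prop := 0 < batch_size
instance (iterator : List Int) (batch_size : Int) : Decidable (Pre_batch_generator_with_index iterator batch_size) := by unfold Pre_batch_generator_with_index; infer_instance
def pvWitness_batch_generator_with_index : List Int × Int := ([1, 2, 3], 2)

def Spec_batch_generator_with_index (iterator : List Int) (batch_size : Int) (out : List (Int × List Int)) : Prop := out = batch_generator_with_index_alt iterator batch_size
instance (iterator : List Int) (batch_size : Int) (out : List (Int × List Int)) : Decidable (Spec_batch_generator_with_index iterator batch_size out) := by unfold Spec_batch_generator_with_index; infer_instance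

-- ===== CLAIM (what is proved, stated in full; the proofs are below) =====
def Claim_equal_batch_generator_with_index : Prop := ∀ (iterator : List Int) (batch_size : Int), Dom_batch_generator_with_index iterator batch_size → Pre_batch_generator_with_index iterator batch_size → Spec_batch_generator_with_index iterator batch_size (batch_generator_with_index iterator batch_size)

-- ===== LEMMAS AND PROOFS =====

-- the element-by-element fill is take/drop plus a length test
theorem pvFillA_eq (k : Nat) : ∀ (it acc : List Int),
    pvFillA it k acc = (acc ++ it.take k, it.drop k, decide (it.length < k)) := by
  induction k with
  | zero => intro it acc; simp [pvFillA]
  | succ k ih =>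
    intro it acc
    cases it with
    | nil => simp [pvFillA]
    | cons x xs => simp [pvFillA, ih xs (acc ++ [x])]

theorem pvLoopB_done (fuel : Nat) (data : List Int) (bs start : Nat) (idx : Int)
    (h : data.length ≤ start) : pvLoopB fuel data bs start idx = [] := by
  cases fuel with
  | zero => rfl
  | succ fuel => simp [pvLoopB, Nat.not_lt.mpr h]

theorem pvLoop_eq (bs : Nat) (hbs : 1 ≤ bs) (data : List Int) :
    ∀ (fuel : Nat) (start : Nat) (idx : Int),
    pvLoopA fuel (data.drop start) bs idx = pvLoopB fuel data bs start idx := by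
  intro fuel
  induction fuel with
  | zero => intro start idx; rfl
  | succ fuel ih =>
    intro start idx
    simp only [pvLoopA, pvLoopB, pvFillA_eq, List.nil_append]
    rw [PySem.List.slice_natCast_add]
    have hlen : (data.drop start).length = data.length - start := List.length_drop ..
    by_cases h : (data.drop start).length < bs
    · simp only [h, decide_true, if_true]
      by_cases hne : data.drop start = []
      · have : data.length ≤ start := by
          have := List.drop_eq_nil_iff.mp hne; omega
        rw [List.take_of_length_le (Nat.le_of_lt h)]
        simp [hne, Nat.not_lt.mpr this]
      · have hstart : start < data.length := by
          rcases Nat.lt_or_ge start data.length with h' | h'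
          · exact h'
          · exact absurd (List.drop_eq_nil_iff.mpr h') hne
        rw [List.take_of_length_le (Nat.le_of_lt h)]
        simp only [hne, if_true, hstart, ne_eq, not_false_iff]
        rw [pvLoopB_done fuel data bs (start + bs) (idx + 1) (by omega)]
    · have hge : bs ≤ (data.drop start).length := Nat.not_lt.mp h
      have hstart : start < data.length := by omega
      simp only [h, decide_false, Bool.false_eq_true, if_false, hstart, if_true]
      rw [List.drop_drop, ih (start + bs) (idx + 1)]

-- ===== VERDICT (by name: the statement is the Claim_ definition above) =====
theorem batch_generator_with_index_spec : Claim_equal_batch_generator_with_index := by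
  intro iterator batch_size _ hpre
  unfold Spec_batch_generator_with_index batch_generator_with_index batch_generator_with_index_alt
  have hbs : 1 ≤ batch_size.toNat := by
    unfold Pre_batch_generator_with_index at hpre; omega
  simpa using pvLoop_eq batch_size.toNat hbs iterator (iterator.length + 1) 0 0
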